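-- pv_equiv track=rewrite | github.com/ryan-gang/Competitive-Programming | Leetcode/Jump_Game_VI.py | maxResultPDeque
-- ===== SOURCE A (Python) =====
-- from collections import deque
-- from typing import List
--
-- def maxResultPDeque(nums: List[int], k: int) -> int:
--     dp = [0] * len(nums)
--     dp[0] = nums[0]
--     # Create DP array, with all zeros. Initialize with value for 0th idx.
--     d = deque([(nums[0], 0)])
--     # Push 0th idx value to deque also.
--     for i in range(1, len(nums)):
--         # d[0] will always be the largest value of the last k dp entries.
--         dp[i] = nums[i] + d[0][0]
--         # If deque contains any value <= dp[i] it has to be removed,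
--         # the lower values will never be used anyway. Plus it will
--         # break out sort. Always removing the smaller numbers will
--         # make the larger values bubble to the top.
--         while d and d[-1][0] < dp[i]:
--             d.pop()
--         # Append current dp entry to deque.
--         # deque is sorted here BTW, all vals less than dp[i] have been removed.
--         # Either dp[i] is largest, or some other large value is infront of dp[i]
--         d.append((dp[i], i))
--         # If the largest values (dp[0]) have occured before i - k idxs,
--         # it have to be removed. They can't be used.
--         if i - k == d[0][1]:
--             d.popleft()
--     return dp[-1]
-- ===== SOURCE B (Python) =====
-- from typing import List
--
-- def maxResultPDeque(nums: List[int], k: int) -> int: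
--     # Direct DP: dp[i] = nums[i] + max of the previous (at most k) dp values,
--     # taken with a plain slice + max() instead of a monotonic deque.
--     dp = [nums[0]]
--     for i in range(1, len(nums)):
--         dp.append(nums[i] + max(dp[max(0, i - k):]))
--     return dp[-1]
-- ===== Notes on version B (the rewrite author's own statement) =====
-- stated objective: simpler
-- what changed: The monotonic-deque sliding-window-maximum bookkeeping is replaced by a plain dp list where each entry takes max() over the slice of the last k dp values directly.
-- outside the precondition, e.g. on maxResultPDeque([1, -5, 2, -4], -2): A returns -1, B raises ValueError; on maxResultPDeque([2, 3], 0): A returns 5, B raises ValueError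
import Mathlib
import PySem

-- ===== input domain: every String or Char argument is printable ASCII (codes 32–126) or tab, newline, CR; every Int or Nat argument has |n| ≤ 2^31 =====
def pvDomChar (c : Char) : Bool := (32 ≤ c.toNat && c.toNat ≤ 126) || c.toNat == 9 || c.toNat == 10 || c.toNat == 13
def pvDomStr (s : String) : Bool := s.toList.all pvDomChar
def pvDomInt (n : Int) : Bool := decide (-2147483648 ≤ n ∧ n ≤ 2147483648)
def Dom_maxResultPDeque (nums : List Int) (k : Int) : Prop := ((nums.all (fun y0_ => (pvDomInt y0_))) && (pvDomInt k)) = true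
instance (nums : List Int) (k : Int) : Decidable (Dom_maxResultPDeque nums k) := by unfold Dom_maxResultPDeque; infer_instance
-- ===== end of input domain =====

-- B replaces A's monotonic-deque sliding-window maximum by a plain max() over the dp window slice (simpler; same return value on Pre_).

-- ===== PORT A =====
-- one iteration of A's for-loop; state = (dp so far, deque front-at-head)
def pvStepA (nums : List Int) (k : Int) (st : List Int × List (Int × Int)) (i : Int) : List Int × List (Int × Int) :=
  let dp := st.1
  let d := st.2
  -- dp[i] = nums[i] + d[0][0]   (d nonempty on Pre_; headD models d[0])
  let dpi := PySem.List.pyGetD nums i 0 + (d.headD (0, 0)).1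
  -- while d and d[-1][0] < dp[i]: d.pop()   -- pop from the back, then append (dp[i], i)
  let d1 := (d.reverse.dropWhile (fun p => decide (p.1 < dpi))).reverse ++ [(dpi, i)]
  -- if i - k == d[0][1]: d.popleft()
  let d2 := if i - k = (d1.headD (0, 0)).2 then d1.tail else d1
  (dp ++ [dpi], d2)

def maxResultPDeque (nums : List Int) (k : Int) : Int :=
  match nums with
  | [] => 0   -- Python raises IndexError on dp[0]; excluded by Pre_
  | n0 :: _ =>
    -- dp is written left to right, so the preallocated [0]*n array is modelled as a growing list
    let st := (PySem.List.pyRange 1 (nums.length : Int) 1).foldl (pvStepA nums k) ([n0], [(n0, 0)])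
    PySem.List.pyGetD st.1 (-1) 0   -- dp[-1]

-- ===== PORT B =====
-- one iteration of B's for-loop; state = dp so far
def pvStepB (nums : List Int) (k : Int) (dp : List Int) (i : Int) : List Int :=
  -- dp.append(nums[i] + max(dp[max(0, i - k):]))   (window nonempty on Pre_; getD models max())
  let w := PySem.List.slice dp (some (max 0 (i - k))) none
  dp ++ [PySem.List.pyGetD nums i 0 + (PySem.List.max? w (fun x => x)).getD 0]

def maxResultPDeque_alt (nums : List Int) (k : Int) : Int :=
  match nums with
  | [] => 0   -- Python raises IndexError on nums[0]; excluded by Pre_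
  | n0 :: _ =>
    let dp := (PySem.List.pyRange 1 (nums.length : Int) 1).foldl (pvStepB nums k) [n0]
    PySem.List.pyGetD dp (-1) 0   -- dp[-1]

-- ===== PRECONDITION & SPEC =====
-- Pre_ excludes empty nums (A raises IndexError on dp[0]) and k ≤ 0 with more than one element:
-- jumps of at most k make no sense there, A's value (a running prefix max for k < 0, a sporadic
-- IndexError for k = 0) is an accident of the deque bookkeeping, and B raises ValueError (max of
-- an empty window) on those inputs.
def Pre_maxResultPDeque (nums : List Int) (k : Int) : Prop :=
  nums ≠ [] ∧ (1 ≤ k ∨ nums.length = 1)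
instance (nums : List Int) (k : Int) : Decidable (Pre_maxResultPDeque nums k) := by
  unfold Pre_maxResultPDeque; infer_instance

def pvWitness_maxResultPDeque : List Int × Int := ([3, -1, 2, -5, 4], 2)

def Spec_maxResultPDeque (nums : List Int) (k : Int) (out : Int) : Prop := out = maxResultPDeque_alt nums k
instance (nums : List Int) (k : Int) (out : Int) : Decidable (Spec_maxResultPDeque nums k out) := by unfold Spec_maxResultPDeque; infer_instance

-- ===== CLAIM (what is proved, stated in full; the proofs are below) =====
def Claim_equal_maxResultPDeque : Prop := ∀ (nums : List Int) (k : Int), Dom_maxResultPDeque nums k → Pre_maxResultPDeque nums k → Spec_maxResultPDeque nums k (maxResultPDeque nums k)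

-- ===== LEMMAS AND PROOFS =====

-- the canonical deque content: indices j of the window [lo, m) whose dp value dominates every later one
def canonJs (dp : List Int) (lo m : Nat) : List Nat :=
  (List.range m).filter (fun j => decide (lo ≤ j ∧ ∀ j' < m, j < j' → dp.getD j' 0 ≤ dp.getD j 0))

lemma mem_canonJs {dp : List Int} {lo m j : Nat} :
    j ∈ canonJs dp lo m ↔ j < m ∧ lo ≤ j ∧ ∀ j', j < j' → j' < m → dp.getD j' 0 ≤ dp.getD j 0 := by
  simp only [canonJs, List.mem_filter, List.mem_range, decide_eq_true_eq]
  constructor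
  · rintro ⟨h1, h2, h3⟩; exact ⟨h1, h2, fun j' ha hb => h3 j' hb ha⟩
  · rintro ⟨h1, h2, h3⟩; exact ⟨h1, h2, fun j' hb ha => h3 j' ha hb⟩

lemma canonJs_sorted (dp : List Int) (lo m : Nat) : (canonJs dp lo m).Pairwise (· < ·) :=
  (List.pairwise_lt_range).filter _

lemma canonJs_last_mem {dp : List Int} {lo m : Nat} (hm : 1 ≤ m) (hlo : lo ≤ m - 1) :
    m - 1 ∈ canonJs dp lo m := by
  rw [mem_canonJs]
  exact ⟨by omega, hlo, fun j' h1 h2 => by omega⟩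

lemma canonJs_ne_nil {dp : List Int} {lo m : Nat} (hm : 1 ≤ m) (hlo : lo ≤ m - 1) :
    canonJs dp lo m ≠ [] := by
  intro h
  have := canonJs_last_mem (dp := dp) hm hlo
  simp [h] at this

-- head of canonJs is its minimum
lemma canonJs_head_min {dp : List Int} {lo m : Nat} {j0 : Nat} {t : List Nat}
    (h : canonJs dp lo m = j0 :: t) : ∀ j ∈ canonJs dp lo m, j0 ≤ j := by
  have hs := canonJs_sorted dp lo m
  rw [h] at hs ⊢
  intro j hj
  rcases List.mem_cons.mp hj with rfl | hj
  · exact le_refl j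
  · exact le_of_lt ((List.pairwise_cons.mp hs).1 j hj)

-- every window position is dominated by some canonJs member at or after it
lemma canonJs_reach {dp : List Int} {lo m : Nat} :
    ∀ N j', lo ≤ j' → j' < m → m - j' ≤ N →
      ∃ j ∈ canonJs dp lo m, j' ≤ j ∧ dp.getD j' 0 ≤ dp.getD j 0 := by
  intro N
  induction N with
  | zero => intro j' h1 h2 h3; omega
  | succ N ih =>
    intro j' h1 h2 h3
    by_cases hmem : j' ∈ canonJs dp lo m
    · exact ⟨j', hmem, le_refl _, le_refl _⟩
    · have : ¬ (j' < m ∧ lo ≤ j' ∧ ∀ j'', j' < j'' → j'' < m → dp.getD j'' 0 ≤ dp.getD j' 0) := by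
        rw [← mem_canonJs]; exact hmem
      push Not at this
      obtain ⟨j'', hgt, hlt, hval⟩ := this h2 h1
      obtain ⟨j, hj, hle, hd⟩ := ih j'' (by omega) hlt (by omega)
      exact ⟨j, hj, by omega, le_trans (le_of_lt hval) hd⟩

-- head value of canonJs = B's max over the window slice
lemma canonJs_head_val {dp : List Int} {lo m : Nat} {j0 : Nat} {t : List Nat}
    (hlen : dp.length = m) (h : canonJs dp lo m = j0 :: t) :
    (PySem.List.max? (dp.drop lo) (fun x => x)).getD 0 = dp.getD j0 0 := by
  have hj0 := mem_canonJs.mp (h ▸ List.mem_cons_self)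
  -- every value of the window is an entry dp.getD j 0, lo ≤ j < m, and conversely
  have hwin : ∀ x ∈ dp.drop lo, ∃ j, lo ≤ j ∧ j < m ∧ dp.getD j 0 = x := by
    intro x hx
    obtain ⟨i, hi, hx⟩ := List.mem_iff_getElem.mp hx
    refine ⟨lo + i, by omega, by simp [List.length_drop] at hi; omega, ?_⟩
    rw [List.getD_eq_getElem _ _ (by simp [List.length_drop] at hi; omega)]
    rw [← hx, List.getElem_drop]
  have hub : ∀ x ∈ dp.drop lo, x ≤ dp.getD j0 0 := by
    intro x hx
    obtain ⟨j, hj1, hj2, rfl⟩ := hwin x hx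
    obtain ⟨j1, hj1mem, hle, hdom⟩ := canonJs_reach m j hj1 hj2 (by omega)
    have hj0le := canonJs_head_min h j1 hj1mem
    rcases eq_or_lt_of_le hj0le with rfl | hlt
    · exact hdom
    · exact le_trans hdom (hj0.2.2 j1 hlt (mem_canonJs.mp hj1mem).1)
  have hmem : dp.getD j0 0 ∈ dp.drop lo := by
    rw [List.getD_eq_getElem _ _ (by omega)]
    rw [List.mem_iff_getElem]
    exact ⟨j0 - lo, by simp [List.length_drop]; omega, by rw [List.getElem_drop]; congr 1; omega⟩
  cases hw : dp.drop lo with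
  | nil => rw [hw] at hmem; simp at hmem
  | cons w0 wt =>
    rw [PySem.List.max?_id_cons, Option.getD_some]
    rw [hw] at hub hmem
    have hMub : dp.getD j0 0 ≤ wt.foldl max w0 := by
      rcases List.mem_cons.mp hmem with rfl | hm2
      · exact (PySem.List.le_foldl_max wt _).1
      · exact (PySem.List.le_foldl_max wt _).2 _ hm2
    have hMmem : wt.foldl max w0 ∈ w0 :: wt := by
      rcases PySem.List.foldl_max_mem wt w0 with hh | hh
      · rw [hh]; exact List.mem_cons_self
      · exact List.mem_cons_of_mem _ hh
    exact le_antisymm (hub _ hMmem) hMub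

-- pop-from-back-while on a value-nonincreasing pair list is a filter
lemma dropBack_eq_filter (v : Int) :
    ∀ (l : List (Int × Int)), l.Pairwise (fun a b => b.1 ≤ a.1) →
      ((l.reverse.dropWhile (fun p => decide (p.1 < v))).reverse : List (Int × Int))
        = l.filter (fun p => decide (v ≤ p.1)) := by
  intro l
  induction l using List.reverseRecOn with
  | nil => simp
  | append_singleton l' a ih =>
    intro hp
    have hp' := (List.pairwise_append.mp hp).1
    have hall : ∀ p ∈ l', a.1 ≤ p.1 := by
      intro p hpmem
      exact (List.pairwise_append.mp hp).2.2 p hpmem a (List.mem_singleton.mpr rfl)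
    rw [List.reverse_append, List.reverse_singleton, List.singleton_append, List.filter_append]
    by_cases hv : a.1 < v
    · rw [List.dropWhile_cons_of_pos (by simpa using hv)]
      rw [ih hp']
      simp [not_le.mpr hv]
    · rw [List.dropWhile_cons_of_neg (by simpa using hv)]
      simp only [List.reverse_cons, List.reverse_reverse]
      have : l'.filter (fun p => decide (v ≤ p.1)) = l' :=
        List.filter_eq_self.mpr (fun p hpmem => by simpa using le_trans (not_lt.mp hv) (hall p hpmem))
      simp [this, not_lt.mp hv]

-- raising the window floor is a filter
lemma canonJs_floor (dp : List Int) (lo lo' m : Nat) (h : lo ≤ lo') :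
    canonJs dp lo' m = (canonJs dp lo m).filter (fun j => decide (lo' ≤ j)) := by
  unfold canonJs
  rw [List.filter_filter]
  apply List.filter_congr
  intro j _
  by_cases h1 : lo' ≤ j
  · have h2 : lo ≤ j := le_trans h h1
    simp [h1, h2]
  · simp [h1]

-- the one-step update of canonJs
lemma canonJs_step (dp : List Int) (lo m : Nat) (v : Int) (hlen : dp.length = m) (hlo : lo ≤ m) :
    canonJs (dp ++ [v]) lo (m + 1)
      = (canonJs dp lo m).filter (fun j => decide (v ≤ dp.getD j 0)) ++ [m] := by
  unfold canonJs
  rw [List.filter_filter, List.range_succ, List.filter_append]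
  congr 1
  · apply List.filter_congr
    intro j hj
    rw [List.mem_range] at hj
    have hgj : (dp ++ [v]).getD j 0 = dp.getD j 0 := List.getD_append _ _ _ _ (by omega)
    have hgm : (dp ++ [v]).getD m 0 = v := by
      rw [List.getD_append_right _ _ _ _ (by omega)]
      simp [hlen]
    rw [← Bool.decide_and, decide_eq_decide]
    constructor
    · rintro ⟨h1, hforall⟩
      have hv := hforall m (by omega) hj
      rw [hgm, hgj] at hv
      refine ⟨hv, h1, fun j' hj' hlt => ?_⟩
      have h5 := hforall j' (by omega) hlt
      rwa [hgj, List.getD_append _ _ _ _ (by omega)] at h5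
    · rintro ⟨hv, h1, hforall⟩
      refine ⟨h1, fun j' hj' hlt => ?_⟩
      rw [hgj]
      rcases Nat.lt_succ_iff_lt_or_eq.mp hj' with hlt' | rfl
      · rw [List.getD_append _ _ _ _ (by omega)]; exact hforall j' hlt' hlt
      · rw [hgm]; exact hv
  · have h2 : ∀ j' < m + 1, m < j' → (dp ++ [v]).getD j' 0 ≤ (dp ++ [v]).getD m 0 :=
      fun j' h1 h2 => by omega
    simp only [List.filter_singleton]
    have h3 : ∀ j' ≤ m, m < j' → ((dp ++ [v])[j']?).getD 0 ≤ ((dp ++ [v])[m]?).getD 0 :=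
      fun j' h1 h2 => by omega
    simp [hlo, decide_eq_true h3]

-- values along canonJs are non-increasing
lemma canonJs_vals_antitone (dp : List Int) (lo m : Nat) :
    (canonJs dp lo m).Pairwise (fun j1 j2 => dp.getD j2 0 ≤ dp.getD j1 0) := by
  refine List.Pairwise.imp_of_mem ?_ (canonJs_sorted dp lo m)
  intro a b ha hb hab
  exact (mem_canonJs.mp ha).2.2 b hab (mem_canonJs.mp hb).1

-- the loop invariant: A's dp equals B's dp, and A's deque is the canonical window deque
lemma pv_main (nums : List Int) (k : Int) (n0 : Int) (hk : 1 ≤ k) :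
    ∀ m : Nat, 1 ≤ m → m ≤ nums.length →
      (((PySem.List.pyRange 1 (m : Int) 1).foldl (pvStepA nums k) ([n0], [(n0, (0 : Int))])).1
          = (PySem.List.pyRange 1 (m : Int) 1).foldl (pvStepB nums k) [n0])
      ∧ ((PySem.List.pyRange 1 (m : Int) 1).foldl (pvStepB nums k) [n0]).length = m
      ∧ (((PySem.List.pyRange 1 (m : Int) 1).foldl (pvStepA nums k) ([n0], [(n0, (0 : Int))])).2
          = (canonJs ((PySem.List.pyRange 1 (m : Int) 1).foldl (pvStepB nums k) [n0]) (m - k.toNat) m).map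
              (fun j => (((PySem.List.pyRange 1 (m : Int) 1).foldl (pvStepB nums k) [n0]).getD j 0, (j : Int)))) := by
  have hk1 : 1 ≤ k.toNat := by omega
  intro m hm
  induction m, hm using Nat.le_induction with
  | base =>
    intro _
    have hr : PySem.List.pyRange 1 ((1 : Nat) : Int) 1 = [] := PySem.List.pyRange_one_eq_nil (by norm_num)
    have hc : canonJs [n0] 0 1 = [0] := by
      unfold canonJs
      rw [List.range_one, List.filter_singleton,
        decide_eq_true ⟨Nat.le_refl 0, fun j' h1 h2 => by omega⟩]
      rfl
    have hlo : (1 : Nat) - k.toNat = 0 := by omega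
    refine ⟨by rw [hr]; rfl, by rw [hr]; rfl, ?_⟩
    rw [hr, hlo]
    simp [hc]
  | succ m hm ih =>
    intro hle
    obtain ⟨ihA, ihLen, ihD⟩ := ih (by omega)
    have hrange : PySem.List.pyRange 1 (((m + 1 : Nat)) : Int) 1
        = PySem.List.pyRange 1 (m : Int) 1 ++ [(m : Int)] := by
      push_cast
      exact PySem.List.pyRange_one_succ_right (by exact_mod_cast hm)
    set FB := (PySem.List.pyRange 1 (m : Int) 1).foldl (pvStepB nums k) [n0] with hFBdef
    set lo := m - k.toNat with hlodef
    have hSA : (PySem.List.pyRange 1 (m : Int) 1).foldl (pvStepA nums k) ([n0], [(n0, (0 : Int))])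
        = (FB, (canonJs FB lo m).map (fun j => (FB.getD j 0, (j : Int)))) :=
      Prod.ext ihA ihD
    have hloe : lo ≤ m - 1 := by omega
    obtain ⟨j0, t, hq⟩ : ∃ j0 t, canonJs FB lo m = j0 :: t := by
      cases hcc : canonJs FB lo m with
      | nil => exact absurd hcc (canonJs_ne_nil hm hloe)
      | cons a b => exact ⟨a, b, rfl⟩
    -- the B-side window is dp.drop lo, and its max is the deque front value
    have hw : PySem.List.slice FB (some (max 0 ((m : Int) - k))) none = FB.drop lo := by
      rw [PySem.List.slice_from _ (le_max_left 0 _)]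
      congr 1
      omega
    have hmax : (PySem.List.max? (FB.drop lo) (fun x => x)).getD 0 = FB.getD j0 0 :=
      canonJs_head_val ihLen hq
    -- the common new dp value
    set v : Int := PySem.List.pyGetD nums (m : Int) 0 + FB.getD j0 0 with hvdef
    have hstepB : pvStepB nums k FB (m : Int) = FB ++ [v] := by
      simp only [pvStepB, hw, hmax]
      rw [hvdef]
    -- A's deque after pop-back + append is the canonical deque of the extended dp
    have hpair : ((canonJs FB lo m).map (fun j => (FB.getD j 0, (j : Int)))).Pairwise
        (fun a b => b.1 ≤ a.1) := by
      rw [List.pairwise_map]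
      exact canonJs_vals_antitone FB lo m
    have hstep := canonJs_step FB lo m v ihLen (by omega)
    have hd1 : ((((canonJs FB lo m).map (fun j => (FB.getD j 0, (j : Int)))).reverse.dropWhile
            (fun p => decide (p.1 < v))).reverse ++ [(v, (m : Int))])
        = (canonJs (FB ++ [v]) lo (m + 1)).map (fun j => ((FB ++ [v]).getD j 0, (j : Int))) := by
      rw [dropBack_eq_filter v _ hpair, List.filter_map, hstep, List.map_append]
      congr 1
      · apply List.map_congr_left
        intro j hj
        have hj' := List.mem_filter.mp hj
        have hjm : j < m := (mem_canonJs.mp hj'.1).1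
        rw [List.getD_append _ _ _ _ (by omega)]
      · simp only [List.map_singleton]
        rw [List.getD_append_right _ _ _ _ (by omega)]
        simp [ihLen]
    -- the popleft step matches raising the window floor
    obtain ⟨q0, t', hq'⟩ : ∃ q0 t', canonJs (FB ++ [v]) lo (m + 1) = q0 :: t' := by
      cases hcc : canonJs (FB ++ [v]) lo (m + 1) with
      | nil =>
        rw [hstep] at hcc
        simp at hcc
      | cons a b => exact ⟨a, b, rfl⟩
    have hq0lo : lo ≤ q0 := (mem_canonJs.mp (hq' ▸ List.mem_cons_self)).2.1
    have ht'gt : ∀ j ∈ t', q0 < j := by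
      have hs := canonJs_sorted (FB ++ [v]) lo (m + 1)
      rw [hq'] at hs
      exact fun j hj => (List.pairwise_cons.mp hs).1 j hj
    have hpop : (if (m : Int) - k = (q0 : Int) then
          ((canonJs (FB ++ [v]) lo (m + 1)).map (fun j => ((FB ++ [v]).getD j 0, (j : Int)))).tail
        else (canonJs (FB ++ [v]) lo (m + 1)).map (fun j => ((FB ++ [v]).getD j 0, (j : Int))))
        = (canonJs (FB ++ [v]) (m + 1 - k.toNat) (m + 1)).map
            (fun j => ((FB ++ [v]).getD j 0, (j : Int))) := by
      by_cases hmk : k.toNat ≤ m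
      · have hcast : (m : Int) - k = (lo : Int) := by omega
        have hfloor := canonJs_floor (FB ++ [v]) lo (lo + 1) (m + 1) (by omega)
        have hlo' : m + 1 - k.toNat = lo + 1 := by omega
        rw [hlo']
        by_cases hq0 : q0 = lo
        · rw [if_pos (by rw [hcast, hq0])]
          rw [hq', List.map_cons, List.tail_cons, hfloor, hq', List.filter_cons]
          rw [decide_eq_false (by omega : ¬ (lo + 1 ≤ q0))]
          simp only [Bool.false_eq_true, if_false]
          rw [List.filter_eq_self.mpr (fun j hj => decide_eq_true (by have := ht'gt j hj; omega))]
        · rw [if_neg (by rw [hcast]; exact fun h => hq0 (by exact_mod_cast h.symm))]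
          rw [hfloor, hq', List.filter_eq_self.mpr ?_, ← hq']
          intro j hj
          rcases List.mem_cons.mp hj with rfl | hj
          · exact decide_eq_true (by omega)
          · exact decide_eq_true (by have := ht'gt j hj; omega)
      · have hne : ¬ ((m : Int) - k = (q0 : Int)) := by
          have : (0 : Int) ≤ (q0 : Int) := Int.natCast_nonneg _
          omega
        rw [if_neg hne]
        have : m + 1 - k.toNat = lo := by omega
        rw [this]
    -- assemble
    have hfront : (((canonJs FB lo m).map (fun j => (FB.getD j 0, (j : Int)))).headD (0, 0)).1
        = FB.getD j0 0 := by rw [hq]; rfl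
    have hfront2 : (((canonJs (FB ++ [v]) lo (m + 1)).map
          (fun j => ((FB ++ [v]).getD j 0, (j : Int)))).headD (0, 0)).2 = (q0 : Int) := by
      rw [hq']; rfl
    rw [hrange]
    simp only [List.foldl_append, List.foldl_cons, List.foldl_nil]
    rw [hSA, hstepB]
    refine ⟨?_, ?_, ?_⟩
    · simp only [pvStepA]
      rw [hfront, ← hvdef]
    · simp [ihLen]
    · simp only [pvStepA]
      rw [hfront, ← hvdef, hd1, hfront2, hpop]

theorem maxResultPDeque_spec : Claim_equal_maxResultPDeque := by
  intro nums k _ hpre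
  unfold Spec_maxResultPDeque
  obtain ⟨hne, hcase⟩ := hpre
  cases nums with
  | nil => exact absurd rfl hne
  | cons n0 rest =>
    rcases hcase with hk | hlen1
    · have h := pv_main (n0 :: rest) k n0 hk (n0 :: rest).length (by simp) (le_refl _)
      simp only [maxResultPDeque, maxResultPDeque_alt]
      rw [h.1]
    · have hrest : rest = [] := by simpa using hlen1
      subst hrest
      simp only [maxResultPDeque, maxResultPDeque_alt]
      rw [show ((List.length [n0] : Nat) : Int) = 1 by simp,
        PySem.List.pyRange_one_eq_nil (le_refl 1)]
      rfl
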